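-- pv_equiv track=rewrite | github.com/DoronF3/advent-of-code-2024 | advent_of_code_2024_9/main.py | identify_files
-- ===== SOURCE A (Python) =====
-- def identify_files(data):
--     """Identify files and their lengths in the input data."""
--     files = []
--     current_file = None
--     start_index = None
--
--     for i, ch in enumerate(data):
--         if ch != '.':
--             if current_file != ch:
--                 if current_file is not None:
--                     files.append((current_file, start_index, i - start_index))
--                 current_file = ch
--                 start_index = i
--         elif current_file is not None:
--             files.append((current_file, start_index, i - start_index))
--             current_file = None
--             start_index = None
--
--     if current_file is not None:  # Add the last file
--         files.append((current_file, start_index, len(data) - start_index))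
--
--     return files
-- ===== SOURCE B (Python) =====
-- def identify_files(data):
--     """Identify files and their lengths in the input data."""
--     files = []
--     i = 0
--     n = len(data)
--     while i < n:
--         ch = data[i]
--         j = i + 1
--         while j < n and data[j] == ch:
--             j += 1
--         if ch != '.':
--             files.append((ch, i, j - i))
--         i = j
--     return files
-- ===== Notes on version B (the rewrite author's own statement) =====
-- stated objective: alternative
-- what changed: Replaced the per-character state machine (current_file/start_index with a trailing flush) by a two-pointer run scan: an outer loop picks the run head, an inner scan finds the run's end, and non-dot runs are emitted directly with no carried state.
import Mathlib
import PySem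

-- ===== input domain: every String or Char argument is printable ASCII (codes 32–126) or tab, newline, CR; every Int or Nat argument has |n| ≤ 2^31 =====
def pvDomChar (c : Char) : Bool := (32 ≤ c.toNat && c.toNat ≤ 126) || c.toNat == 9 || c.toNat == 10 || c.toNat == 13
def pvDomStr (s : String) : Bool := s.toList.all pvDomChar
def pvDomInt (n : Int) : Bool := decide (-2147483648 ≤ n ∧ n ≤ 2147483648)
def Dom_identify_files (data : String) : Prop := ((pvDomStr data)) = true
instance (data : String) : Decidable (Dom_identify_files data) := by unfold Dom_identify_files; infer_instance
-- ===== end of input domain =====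

-- B replaces A's per-character state machine by a two-pointer run scan (alternative decomposition, same O(n) cost).

-- ===== PORT A =====
-- A's loop, char by char: state = (files so far, current_file with its start_index, or none).
-- The index i increments once per consumed char, so at the end of the list i = len(data),
-- which is exactly the value Python's trailing `len(data) - start_index` uses.
def pvLoopA : List Char → Int → List (String × Int × Int) → Option (Char × Int) → List (String × Int × Int)
  | [], i, files, st =>
      match st with
      | some (c, s) => files ++ [(c.toString, s, i - s)]   -- final `if current_file is not None` append
      | none => files
  | ch :: rest, i, files, st =>
      if ch ≠ '.' then
        match st with
        | some (c, s) =>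
            if c ≠ ch then
              pvLoopA rest (i + 1) (files ++ [(c.toString, s, i - s)]) (some (ch, i))
            else
              pvLoopA rest (i + 1) files (some (c, s))
        | none => pvLoopA rest (i + 1) files (some (ch, i))
      else
        match st with
        | some (c, s) => pvLoopA rest (i + 1) (files ++ [(c.toString, s, i - s)]) none
        | none => pvLoopA rest (i + 1) files none

def identify_files (data : String) : List (String × Int × Int) :=
  pvLoopA data.toList 0 [] none

-- ===== PORT B =====
-- B's outer while loop: head char of the remaining list, inner scan (takeWhile) finds the rest
-- of the run, emit if not '.', jump the index past the run (dropWhile).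
def pvLoopB : List Char → Int → List (String × Int × Int)
  | [], _ => []
  | c :: rest, i =>
      let k := (rest.takeWhile (· == c)).length
      (if c ≠ '.' then [(c.toString, i, (1 + k : Int))] else [])
        ++ pvLoopB (rest.dropWhile (· == c)) (i + 1 + k)
termination_by l => l.length
decreasing_by
  simpa using Nat.lt_succ_of_le (List.length_dropWhile_le _ _)

def identify_files_alt (data : String) : List (String × Int × Int) :=
  pvLoopB data.toList 0

-- ===== PRECONDITION & SPEC =====
def Spec_identify_files (data : String) (out : List (String × Int × Int)) : Prop := out = identify_files_alt data
instance (data : String) (out : List (String × Int × Int)) : Decidable (Spec_identify_files data out) := by unfold Spec_identify_files; infer_instance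

-- ===== CLAIM (what is proved, stated in full; the proofs are below) =====
def Claim_equal_identify_files : Prop := ∀ (data : String), Dom_identify_files data → Spec_identify_files data (identify_files data)

-- ===== LEMMAS AND PROOFS =====

-- A's loop with no current file walks through a block of dots just advancing the index.
lemma pvLoopA_skip_dots (p : List Char) (hp : ∀ x ∈ p, x = '.') :
    ∀ (r : List Char) (j : Int) (files : List (String × Int × Int)),
      pvLoopA (p ++ r) j files none = pvLoopA r (j + p.length) files none := by
  induction p with
  | nil => intro r j files; simp
  | cons x p' ih =>
      intro r j files
      have hx : x = '.' := hp x (by simp)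
      have hp' : ∀ y ∈ p', y = '.' := fun y hy => hp y (by simp [hy])
      subst hx
      simp only [List.cons_append, pvLoopA, ne_eq, not_true_eq_false, if_false]
      rw [ih hp']
      congr 1
      simp [List.length_cons]; omega

-- A's loop inside a run of the current char c just advances the index.
lemma pvLoopA_skip_run (c : Char) (hc : c ≠ '.') (p : List Char) (hp : ∀ x ∈ p, x = c) :
    ∀ (r : List Char) (j s : Int) (files : List (String × Int × Int)),
      pvLoopA (p ++ r) j files (some (c, s)) = pvLoopA r (j + p.length) files (some (c, s)) := by
  induction p with
  | nil => intro r j s files; simp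
  | cons x p' ih =>
      intro r j s files
      have hx : x = c := hp x (by simp)
      have hp' : ∀ y ∈ p', y = c := fun y hy => hp y (by simp [hy])
      subst hx
      simp only [List.cons_append, pvLoopA, ne_eq, hc, not_false_eq_true, if_true,
        not_true_eq_false, if_false]
      rw [ih hp']
      congr 1
      simp [List.length_cons]; omega

-- When the next char (if any) differs from the current file c, A's first action is to flush
-- the pending (c, s, j - s) entry and continue with no current file.
lemma pvLoopA_flush (c : Char) (r : List Char) (hr : ∀ d t, r = d :: t → d ≠ c) :
    ∀ (j s : Int) (files : List (String × Int × Int)),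
      pvLoopA r j files (some (c, s)) =
        pvLoopA r j (files ++ [(c.toString, s, j - s)]) none := by
  intro j s files
  cases r with
  | nil => simp [pvLoopA]
  | cons d t =>
      have hdc : d ≠ c := hr d t rfl
      by_cases hd : d = '.'
      · subst hd
        simp [pvLoopA]
      · simp [pvLoopA, hd, Ne.symm hdc]

lemma pvDropWhile_head_false {α : Type} (p : α → Bool) :
    ∀ (l : List α) (d : α) (t : List α), l.dropWhile p = d :: t → p d = false := by
  intro l
  induction l with
  | nil => intro d t h; simp [List.dropWhile] at h
  | cons x xs ih =>
      intro d t h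
      by_cases hx : p x
      · rw [List.dropWhile_cons_of_pos hx] at h; exact ih d t h
      · rw [List.dropWhile_cons_of_neg hx] at h
        cases h; simpa using hx

-- Main invariant: A's loop with empty current state equals B's run scan.
lemma pvMain : ∀ (n : Nat) (l : List Char), l.length ≤ n →
    ∀ (i : Int) (files : List (String × Int × Int)),
      pvLoopA l i files none = files ++ pvLoopB l i := by
  intro n
  induction n with
  | zero =>
      intro l hl i files
      have : l = [] := List.length_eq_zero_iff.mp (Nat.le_zero.mp hl)
      subst this
      simp [pvLoopA, pvLoopB]
  | succ m ih =>
      intro l hl i files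
      cases l with
      | nil => simp [pvLoopA, pvLoopB]
      | cons c rest =>
          have hsplit : rest.takeWhile (· == c) ++ rest.dropWhile (· == c) = rest :=
            List.takeWhile_append_dropWhile
          have htk : ∀ x ∈ rest.takeWhile (· == c), x = c := by
            intro x hx
            simpa using List.mem_takeWhile_imp hx
          have hrlen : (rest.dropWhile (· == c)).length ≤ m := by
            have h1 := List.length_dropWhile_le (· == c) rest
            simp at hl; omega
          have hhead : ∀ d t, rest.dropWhile (· == c) = d :: t → d ≠ c := by
            intro d t h hdc
            have := pvDropWhile_head_false (· == c) rest d t h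
            simp [hdc] at this
          by_cases hc : c = '.'
          · -- dot run: A skips it char by char, B skips the whole run
            subst hc
            have step : pvLoopA ('.' :: rest) i files none = pvLoopA rest (i + 1) files none := by
              simp [pvLoopA]
            have e1 : pvLoopA rest (i + 1) files none =
                pvLoopA (rest.dropWhile (· == '.')) (i + 1 + ((rest.takeWhile (· == '.')).length : Int)) files none := by
              conv_lhs => rw [← hsplit]
              exact pvLoopA_skip_dots _ htk _ _ _
            rw [step, e1, ih _ hrlen]
            show files ++ pvLoopB (rest.dropWhile (· == '.')) _ = files ++ pvLoopB ('.' :: rest) i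
            simp only [pvLoopB, ne_eq, not_true_eq_false, if_false, List.nil_append]
          · -- non-dot run: A opens the run, walks it, flushes at its end; B emits it at once
            have step : pvLoopA (c :: rest) i files none =
                pvLoopA rest (i + 1) files (some (c, i)) := by
              simp [pvLoopA, hc]
            have e1 : pvLoopA rest (i + 1) files (some (c, i)) =
                pvLoopA (rest.dropWhile (· == c)) (i + 1 + ((rest.takeWhile (· == c)).length : Int)) files (some (c, i)) := by
              conv_lhs => rw [← hsplit]
              exact pvLoopA_skip_run c hc _ htk _ _ _ _
            rw [step, e1, pvLoopA_flush c _ hhead, ih _ hrlen]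
            show files ++ [(c.toString, i, i + 1 + ((rest.takeWhile (· == c)).length : Int) - i)]
                ++ pvLoopB (rest.dropWhile (· == c)) (i + 1 + (rest.takeWhile (· == c)).length)
              = files ++ pvLoopB (c :: rest) i
            have harith : i + 1 + ((rest.takeWhile (· == c)).length : Int) - i
                = (1 : Int) + ((rest.takeWhile (· == c)).length : Int) := by omega
            simp only [pvLoopB, ne_eq, hc, not_false_eq_true, if_true, List.append_assoc,
              List.singleton_append, harith]
    
-- ===== VERDICT (by name: the statement is the Claim_ definition above) =====
theorem identify_files_spec : Claim_equal_identify_files := by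
  intro data _
  unfold Spec_identify_files identify_files identify_files_alt
  simpa using pvMain data.toList.length data.toList le_rfl 0 []
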